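-- pv_equiv track=rewrite | github.com/chizarlicious/Football-Data-Converter | code/raw_data_parsers/team_stats.py | split_on_dashes
-- ===== SOURCE A (Python) =====
-- def split_on_dashes(dash_string):
--     """Takes a string of numbers separated by '-' and splits it, assuming that
--     '--' means a separator followed by a negative number.
--
--     args:
--         dash_string: A string of items separated by '-', with a '--' indicated
--         a negative on the item following.
--
--     returns:
--         A tuple of strings.
--     """
--     out_list = dash_string.split('-')
--
--     to_neg = []
--     # Find all the '' entries created by splitting "--". Mark the next entry in
--     # the list as negative.
--     for i in range(len(out_list)):
--         if not out_list[i] and not (i >= (len(out_list) - 1)):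
--             to_neg.append(i + 1)
--     # Add a negative to marked entries
--     for i in to_neg:
--         out_list[i] = '-' + out_list[i]
--     # Remove blank entries (which count as False for if tests) and '-' entries
--     final_out_list = [x for x in out_list if (x and x != '-')]
--
--     return tuple(final_out_list)
-- ===== SOURCE B (Python) =====
-- def split_on_dashes(dash_string):
--     """Single pass over the dash-split tokens carrying a pending-negation flag."""
--     out = []
--     pending = False
--     for tok in dash_string.split('-'):
--         if tok:
--             out.append(('-' + tok) if pending else tok)
--             pending = False
--         else:
--             pending = True
--     return tuple(out)
-- ===== Notes on version B (the rewrite author's own statement) =====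
-- stated objective: simpler
-- what changed: Replaced A's three passes (index-collection list, in-place negation of marked slots, then a trailing filter) by a single pass over the split tokens carrying one pending-negation boolean flag.
import Mathlib
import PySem

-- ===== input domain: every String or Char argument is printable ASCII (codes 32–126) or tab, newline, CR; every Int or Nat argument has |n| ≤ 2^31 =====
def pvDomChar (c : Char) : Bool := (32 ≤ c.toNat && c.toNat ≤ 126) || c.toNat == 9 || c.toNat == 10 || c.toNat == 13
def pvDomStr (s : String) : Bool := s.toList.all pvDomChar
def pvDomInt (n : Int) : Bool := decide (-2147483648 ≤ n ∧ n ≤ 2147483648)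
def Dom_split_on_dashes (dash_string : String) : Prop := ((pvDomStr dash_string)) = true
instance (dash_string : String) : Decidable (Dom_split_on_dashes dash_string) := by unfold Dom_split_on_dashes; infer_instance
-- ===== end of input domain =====

-- B replaces A's three passes (collect indices to negate, mutate them in place, filter blanks)
-- by one pass over the split tokens carrying a single pending-negation boolean; return value only.

-- ===== PORT A =====
-- Tokens are kept as List Char (PySem.Str.split? is by definition PySem.Chars.splitOn on
-- .toList mapped through String.ofList; sep "-" is nonempty so Python's split never raises);
-- the final map String.ofList is that bridge.
def split_on_dashes (dash_string : String) : List String :=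
  let out_list : List (List Char) := PySem.Chars.splitOn dash_string.toList ['-']
  let n : Int := out_list.length
  -- for i in range(len(out_list)): if not out_list[i] and not (i >= len-1): to_neg.append(i+1)
  let to_neg : List Int :=
    (PySem.List.pyRange 0 n 1).foldl
      (fun acc i =>
        if PySem.List.pyGetD out_list i [] = [] ∧ ¬ (i ≥ n - 1) then acc ++ [i + 1] else acc) []
  -- for i in to_neg: out_list[i] = '-' + out_list[i]   (indices produced above are in range)
  let out_list2 : List (List Char) :=
    to_neg.foldl (fun l i => PySem.List.pySetD l i ('-' :: PySem.List.pyGetD l i [])) out_list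
  -- [x for x in out_list if (x and x != '-')]
  let final := out_list2.filter (fun x => decide (x ≠ [] ∧ x ≠ ['-']))
  final.map String.ofList

-- ===== PORT B =====
def split_on_dashes_alt (dash_string : String) : List String :=
  let toks : List (List Char) := PySem.Chars.splitOn dash_string.toList ['-']
  ((toks.foldl
      (fun (st : List (List Char) × Bool) tok =>
        if tok ≠ [] then (st.1 ++ [(if st.2 then ['-'] else []) ++ tok], false)
        else (st.1, true)) ([], false)).1).map String.ofList

-- ===== PRECONDITION & SPEC =====
def Spec_split_on_dashes (dash_string : String) (out : List String) : Prop := out = split_on_dashes_alt dash_string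
instance (dash_string : String) (out : List String) : Decidable (Spec_split_on_dashes dash_string out) := by unfold Spec_split_on_dashes; infer_instance

-- ===== CLAIM (what is proved, stated in full; the proofs are below) =====
def Claim_equal_split_on_dashes : Prop := ∀ (dash_string : String), Dom_split_on_dashes dash_string → Spec_split_on_dashes dash_string (split_on_dashes dash_string)

-- ===== LEMMAS AND PROOFS =====

-- B's loop, as structural recursion: pending flag f, emit nonempty tokens with optional '-' prefix.
def pvGo (f : Bool) : List (List Char) → List (List Char)
  | [] => []
  | t :: ts => if t.isEmpty then pvGo true ts else ((if f then ['-'] else []) ++ t) :: pvGo false ts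

-- A's mutated out_list, as structural recursion: prefix '-' exactly after an empty token.
def pvMut (f : Bool) : List (List Char) → List (List Char)
  | [] => []
  | t :: ts => ((if f then ['-'] else []) ++ t) :: pvMut t.isEmpty ts


theorem pvGo_foldl (ts : List (List Char)) (acc : List (List Char)) (f : Bool) :
    (ts.foldl
      (fun (st : List (List Char) × Bool) tok =>
        if tok ≠ [] then (st.1 ++ [(if st.2 then ['-'] else []) ++ tok], false)
        else (st.1, true)) (acc, f)).1 = acc ++ pvGo f ts := by
  induction ts generalizing acc f with
  | nil => simp [pvGo]
  | cons t ts ih =>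
    rw [List.foldl_cons]
    by_cases ht : t = []
    · subst ht
      change (List.foldl _ (acc, true) ts).1 = _
      rw [ih, show pvGo f ([] :: ts) = pvGo true ts from by simp [pvGo]]
    · change (List.foldl _ (if t ≠ [] then (acc ++ [(if f then ['-'] else []) ++ t], false) else (acc, true)) ts).1 = _
      rw [if_pos ht, ih,
        show pvGo f (t :: ts) = ((if f then ['-'] else []) ++ t) :: pvGo false ts from by
          simp [pvGo, ht]]
      simp

theorem pvMut_length (f : Bool) (ts : List (List Char)) : (pvMut f ts).length = ts.length := by
  induction ts generalizing f with
  | nil => rfl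
  | cons t ts ih => simp [pvMut, ih]

theorem pvMut_getElem (f : Bool) (ts : List (List Char)) (k : Nat) (hk : k < ts.length) :
    (pvMut f ts)[k]'(by rw [pvMut_length]; exact hk) =
      (if (if k = 0 then f else (ts[k-1]'(by omega)).isEmpty) then ['-'] else []) ++ ts[k] := by
  induction ts generalizing f k with
  | nil => simp at hk
  | cons t ts ih =>
    cases k with
    | zero => simp [pvMut]
    | succ k =>
      have hk' : k < ts.length := by simpa using hk
      have := ih t.isEmpty k hk'
      cases k with
      | zero => simpa [pvMut] using this
      | succ m => simpa [pvMut] using this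

theorem pvFilter_pvMut (f : Bool) (ts : List (List Char)) (hT : ∀ t ∈ ts, '-' ∉ t) :
    (pvMut f ts).filter (fun x => decide (x ≠ [] ∧ x ≠ ['-'])) = pvGo f ts := by
  induction ts generalizing f with
  | nil => rfl
  | cons t ts ih =>
    have hts : ∀ u ∈ ts, '-' ∉ u := fun u hu => hT u (List.mem_cons_of_mem _ hu)
    by_cases ht : t = []
    · subst ht
      have hgo : pvGo f ([] :: ts) = pvGo true ts := by simp [pvGo]
      have hmut : pvMut f ([] :: ts) = ((if f then ['-'] else []) ++ []) :: pvMut true ts := rfl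
      have hpred : decide ((if f then ['-'] else []) ++ ([] : List Char) ≠ [] ∧
          (if f then ['-'] else []) ++ ([] : List Char) ≠ ['-']) = false := by
        cases f <;> simp
      rw [hgo, hmut, List.filter_cons, hpred]
      simp only [Bool.false_eq_true, if_false]
      exact ih true hts
    · have h1 : (if f then ['-'] else []) ++ t ≠ [] := by cases f <;> simp [ht]
      have h2 : (if f then ['-'] else []) ++ t ≠ ['-'] := by
        cases f
        · intro h; simp at h
          exact (hT t List.mem_cons_self) (by simp [h])
        · intro h; simp at h
          exact ht h
      have hE : t.isEmpty = false := by simp [ht]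
      have hgo : pvGo f (t :: ts) = ((if f then ['-'] else []) ++ t) :: pvGo false ts := by
        simp [pvGo, ht]
      have hmut : pvMut f (t :: ts) = ((if f then ['-'] else []) ++ t) :: pvMut t.isEmpty ts := rfl
      have hpred : decide ((if f then ['-'] else []) ++ t ≠ [] ∧
          (if f then ['-'] else []) ++ t ≠ ['-']) = true := by simp [h1, h2]
      rw [hgo, hmut, hE, List.filter_cons, hpred]
      rw [ih false hts]
      simp

-- A's second loop: length is preserved and each slot gets a '-' prefix iff its index is in js.
theorem pvSetFold_length (js : List Int) (T : List (List Char)) :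
    (js.foldl (fun l i => PySem.List.pySetD l i ('-' :: PySem.List.pyGetD l i [])) T).length
      = T.length := by
  induction js generalizing T with
  | nil => rfl
  | cons j js ih => simp [List.foldl_cons, ih, PySem.List.length_pySetD]

theorem pvSetFold_get (js : List Int) (T : List (List Char)) (hnd : js.Nodup)
    (hr : ∀ j ∈ js, 0 ≤ j ∧ j < (T.length : Int)) (k : Nat) (hk : k < T.length) :
    PySem.List.pyGetD
        (js.foldl (fun l i => PySem.List.pySetD l i ('-' :: PySem.List.pyGetD l i [])) T)
        (k : Int) []
      = if (k : Int) ∈ js then '-' :: PySem.List.pyGetD T (k : Int) []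
        else PySem.List.pyGetD T (k : Int) [] := by
  induction js generalizing T with
  | nil => simp
  | cons j js ih =>
    obtain ⟨hj0, hjlen⟩ := hr j List.mem_cons_self
    set v := '-' :: PySem.List.pyGetD T j [] with hv
    have hlen' : (PySem.List.pySetD T j v).length = T.length := PySem.List.length_pySetD _ _ _
    have hr' : ∀ i ∈ js, 0 ≤ i ∧ i < ((PySem.List.pySetD T j v).length : Int) := by
      intro i hi; rw [hlen']; exact hr i (List.mem_cons_of_mem _ hi)
    have hjnot : j ∉ js := (List.nodup_cons.mp hnd).1
    have hnd' : js.Nodup := (List.nodup_cons.mp hnd).2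
    rw [List.foldl_cons, ih (PySem.List.pySetD T j v) hnd' hr' (by rw [hlen']; exact hk)]
    have hjn : ((j.toNat : Nat) : Int) = j := by omega
    have hget : PySem.List.pyGetD (PySem.List.pySetD T j v) (k : Int) []
        = if k = j.toNat then v else PySem.List.pyGetD T (k : Int) [] := by
      rw [← hjn]
      exact PySem.List.pyGetD_pySetD_natCast T j.toNat k v [] (by omega)
    rw [hget]
    by_cases hkj : k = j.toNat
    · have hkInt : (k : Int) = j := by omega
      rw [if_pos hkj,
        if_neg (show ¬ (k : Int) ∈ js from by rw [hkInt]; exact hjnot),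
        if_pos (show (k : Int) ∈ j :: js from by rw [hkInt]; exact List.mem_cons_self),
        hv, hkInt]
    · have hkInt : (k : Int) ≠ j := by omega
      rw [if_neg hkj]
      by_cases hm : (k : Int) ∈ js
      · rw [if_pos hm, if_pos (List.mem_cons_of_mem _ hm)]
      · rw [if_neg hm, if_neg (by simp [List.mem_cons, hkInt, hm])]

-- tokens produced by splitting on a single-character separator never contain that character
theorem pvGoSplit_no_sep (c : Char) : ∀ (fuel : Nat) (l cur : List Char) (acc : List (List Char)),
    l.length < fuel → c ∉ cur → (∀ t ∈ acc, c ∉ t) →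
    ∀ t ∈ PySem.Chars.splitOn.go [c] fuel l cur acc, c ∉ t := by
  intro fuel
  induction fuel with
  | zero => intro l _ _ h; omega
  | succ fuel ih =>
    intro l cur acc hl hcur hacc t ht
    cases l with
    | nil =>
      simp only [PySem.Chars.splitOn.go] at ht
      rw [List.mem_reverse] at ht
      rcases List.mem_cons.mp ht with h | h
      · subst h; simpa using hcur
      · exact hacc t h
    | cons c' rest =>
      by_cases hp : List.isPrefixOf [c] (c' :: rest) = true
      · have hc' : c' = c := by
          simp [List.isPrefixOf] at hp; exact hp.symm
        rw [show PySem.Chars.splitOn.go [c] (fuel + 1) (c' :: rest) cur acc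
              = PySem.Chars.splitOn.go [c] fuel (List.drop [c].length (c' :: rest)) [] (cur.reverse :: acc) from by
            simp [PySem.Chars.splitOn.go, hp]] at ht
        refine ih _ _ _ (by simpa using hl) (by simp) ?_ t ht
        intro u hu
        rcases List.mem_cons.mp hu with h | h
        · subst h; simpa using hcur
        · exact hacc u h
      · have hc' : c' ≠ c := by
          intro h; apply hp; simp [List.isPrefixOf, h]
        rw [show PySem.Chars.splitOn.go [c] (fuel + 1) (c' :: rest) cur acc
              = PySem.Chars.splitOn.go [c] fuel rest (c' :: cur) acc from by
            simp [PySem.Chars.splitOn.go, hp]] at ht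
        refine ih _ _ _ (by simpa using hl) ?_ hacc t ht
        intro h
        rcases List.mem_cons.mp h with h | h
        · exact hc' h.symm
        · exact hcur h

theorem pvSplit_no_dash (cs : List Char) : ∀ t ∈ PySem.Chars.splitOn cs ['-'], '-' ∉ t :=
  fun t ht => pvGoSplit_no_sep '-' (cs.length + 1) cs [] [] (by omega) (by simp) (by simp) t ht

-- the core equality, on an arbitrary dash-free token list
theorem pvCore (T : List (List Char)) (hT : ∀ t ∈ T, '-' ∉ t) :
    ((((PySem.List.pyRange 0 (T.length : Int) 1).foldl
        (fun acc i =>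
          if PySem.List.pyGetD T i [] = [] ∧ ¬ (i ≥ (T.length : Int) - 1) then acc ++ [i + 1] else acc) []).foldl
        (fun l i => PySem.List.pySetD l i ('-' :: PySem.List.pyGetD l i [])) T).filter
        (fun x => decide (x ≠ [] ∧ x ≠ ['-'])))
      = (T.foldl
          (fun (st : List (List Char) × Bool) tok =>
            if tok ≠ [] then (st.1 ++ [(if st.2 then ['-'] else []) ++ tok], false)
            else (st.1, true)) ([], false)).1 := by
  have hcond : (fun (acc : List Int) (i : Int) =>
        if PySem.List.pyGetD T i [] = [] ∧ ¬ (i ≥ (T.length : Int) - 1) then acc ++ [i + 1] else acc)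
      = (fun (acc : List Int) (i : Int) =>
        if (decide (PySem.List.pyGetD T i [] = [] ∧ ¬ (i ≥ (T.length : Int) - 1))) = true
        then acc ++ [i + 1] else acc) := by
    funext acc i
    exact if_congr decide_eq_true_iff.symm rfl rfl
  rw [hcond, PySem.List.foldl_append_if]
  simp only [List.nil_append]
  set js := List.map (fun i => i + 1)
      (List.filter (fun i => decide (PySem.List.pyGetD T i [] = [] ∧ ¬ (i ≥ (T.length : Int) - 1)))
        (PySem.List.pyRange 0 (T.length : Int) 1)) with hjs
  have hmem : ∀ k : Int, k ∈ js ↔ 1 ≤ k ∧ k < (T.length : Int) ∧ PySem.List.pyGetD T (k - 1) [] = [] := by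
    intro k
    rw [hjs]
    simp only [List.mem_map, List.mem_filter, PySem.List.mem_pyRange_one, decide_eq_true_eq]
    constructor
    · rintro ⟨i, ⟨⟨hi0, hin⟩, hg, hge⟩, rfl⟩
      refine ⟨by omega, by omega, ?_⟩
      rw [show i + 1 - 1 = i from by ring]; exact hg
    · rintro ⟨h1, h2, h3⟩
      exact ⟨k - 1, ⟨⟨by omega, by omega⟩, h3, by omega⟩, by ring⟩
  have hnd : js.Nodup := by
    rw [hjs]
    exact (List.Nodup.filter _ (PySem.List.nodup_pyRange_one 0 (T.length : Int))).map
      (fun a b h => by omega)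
  have hr : ∀ j ∈ js, 0 ≤ j ∧ j < (T.length : Int) := by
    intro j hj
    have := (hmem j).mp hj
    exact ⟨by omega, this.2.1⟩
  have hlen2 : (js.foldl (fun l i => PySem.List.pySetD l i ('-' :: PySem.List.pyGetD l i [])) T).length
      = T.length := pvSetFold_length js T
  have hA : js.foldl (fun l i => PySem.List.pySetD l i ('-' :: PySem.List.pyGetD l i [])) T
      = pvMut false T := by
    apply List.ext_getElem (by rw [hlen2, pvMut_length])
    intro k h1 h2
    have hkT : k < T.length := by rw [← hlen2]; exact h1
    have hget := pvSetFold_get js T hnd hr k hkT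
    have e1 : PySem.List.pyGetD (js.foldl (fun l i => PySem.List.pySetD l i ('-' :: PySem.List.pyGetD l i [])) T) (k : Int) []
        = (js.foldl (fun l i => PySem.List.pySetD l i ('-' :: PySem.List.pyGetD l i [])) T)[k] := by
      rw [PySem.List.pyGetD_natCast]
      exact List.getD_eq_getElem _ _ h1
    have e2 : PySem.List.pyGetD T (k : Int) [] = T[k] := by
      rw [PySem.List.pyGetD_natCast]
      exact List.getD_eq_getElem _ _ hkT
    rw [← e1, hget, e2, pvMut_getElem false T k hkT]
    by_cases hm : ((k : Nat) : Int) ∈ js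
    · obtain ⟨hk1', hklt', hprev'⟩ := (hmem _).mp hm
      have hk0 : k ≠ 0 := by omega
      have hcast : ((k : Int) - 1) = ((k - 1 : Nat) : Int) := by omega
      have hprevN : T[k - 1]'(by omega) = [] := by
        rw [hcast, PySem.List.pyGetD_natCast] at hprev'
        rwa [List.getD_eq_getElem _ _ (by omega)] at hprev'
      rw [if_pos hm]
      simp [hk0, hprevN]
    · rw [if_neg hm]
      by_cases hk0 : k = 0
      · subst hk0; simp
      · have hk1 : 1 ≤ k := by omega
        have hcast : ((k : Int) - 1) = ((k - 1 : Nat) : Int) := by omega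
        have hprevN : ¬ T[k - 1]'(by omega) = [] := by
          intro h
          apply hm
          rw [hmem]
          refine ⟨by omega, by exact_mod_cast hkT, ?_⟩
          rw [hcast, PySem.List.pyGetD_natCast, List.getD_eq_getElem _ _ (by omega), h]
        simp [hk0, List.isEmpty_iff, hprevN]
  rw [hA, pvFilter_pvMut false T hT, pvGo_foldl]
  simp

-- ===== VERDICT (by name: the statement is the Claim_ definition above) =====
theorem split_on_dashes_spec : Claim_equal_split_on_dashes := by
  intro s _
  show split_on_dashes s = split_on_dashes_alt s
  exact congrArg (List.map String.ofList) (pvCore _ (pvSplit_no_dash s.toList))
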